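-- pv_equiv track=rewrite | github.com/vEnhance/dotfiles | py-scripts/mango.py | is_inside_latex
-- ===== SOURCE A (Python) =====
-- def is_inside_latex(text: str, position: int) -> bool:
--     r"""
--     Check if a position in text is inside a LaTeX expression (between $ or $$).
--     Handles escaped dollar signs \$.
--     """
--     dollar_count = 0
--     i = 0
--     while i < position:
--         if text[i] == "$":
--             if i > 0 and text[i - 1] == "\\":
--                 num_backslashes = 0
--                 j = i - 1
--                 while j >= 0 and text[j] == "\\":
--                     num_backslashes += 1
--                     j -= 1
--                 if num_backslashes % 2 == 1:  # odd = escaped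
--                     i += 1
--                     continue
--             dollar_count += 1
--         i += 1
--
--     return dollar_count % 2 == 1
-- ===== SOURCE B (Python) =====
-- def is_inside_latex(text: str, position: int) -> bool:
--     # Single forward pass keeping a running count of the current backslash run,
--     # instead of re-scanning backwards at every dollar sign.
--     dollar_count = 0
--     backslash_run = 0
--     for i in range(position):
--         ch = text[i]
--         if ch == "\\":
--             backslash_run += 1
--         elif ch == "$":
--             if backslash_run % 2 == 0:
--                 dollar_count += 1
--             backslash_run = 0
--         else:
--             backslash_run = 0
--     return dollar_count % 2 == 1
-- ===== Notes on version B (the rewrite author's own statement) =====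
-- stated objective: simpler
-- what changed: Replaced the nested backward re-scan of backslashes at each '$' by a single forward pass that maintains a running backslash-run counter.
import Mathlib
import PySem

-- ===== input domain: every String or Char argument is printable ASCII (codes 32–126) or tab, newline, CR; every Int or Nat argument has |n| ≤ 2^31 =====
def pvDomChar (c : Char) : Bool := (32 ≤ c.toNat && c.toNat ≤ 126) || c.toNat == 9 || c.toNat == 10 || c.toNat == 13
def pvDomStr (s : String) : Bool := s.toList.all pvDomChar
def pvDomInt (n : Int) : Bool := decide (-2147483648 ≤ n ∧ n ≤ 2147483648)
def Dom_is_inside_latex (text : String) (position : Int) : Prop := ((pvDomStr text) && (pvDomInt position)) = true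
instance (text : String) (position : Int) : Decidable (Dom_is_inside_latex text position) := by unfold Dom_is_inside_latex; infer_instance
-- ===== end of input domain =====

-- B replaces A's nested backward backslash re-scan at each '$' by a single forward pass
-- with a running backslash-run counter (simpler, one loop instead of nested loops).


-- ===== PORT A =====
-- inner 'while j >= 0 and text[j] == "\\"' loop, accumulating num_backslashes
def aCount (cs : List Char) (j : Int) (acc : Int) : Int :=
  if h : 0 ≤ j ∧ PySem.List.pyGet? cs j = some '\\' then aCount cs (j - 1) (acc + 1) else acc
termination_by (j + 1).toNat
decreasing_by omega

-- outer 'while i < position' loop of A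
def aLoop (cs : List Char) (position : Int) (i : Int) (dollar : Int) : Int :=
  if _h : i < position then
    match PySem.List.pyGet? cs i with
    | none => dollar  -- Python raises IndexError here; excluded by Pre_
    | some c =>
      if c = '$' then
        if i > 0 ∧ PySem.List.pyGet? cs (i - 1) = some '\\' then
          if PySem.Int.mod (aCount cs (i - 1) 0) 2 = 1 then
            aLoop cs position (i + 1) dollar          -- escaped: continue
          else
            aLoop cs position (i + 1) (dollar + 1)
        else
          aLoop cs position (i + 1) (dollar + 1)
      else
        aLoop cs position (i + 1) dollar
  else dollar
termination_by (position - i).toNat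
decreasing_by all_goals omega

def is_inside_latex (text : String) (position : Int) : Bool :=
  PySem.Int.mod (aLoop text.toList position 0 0) 2 = 1

-- ===== PORT B =====
-- one step of B's for-loop body; state = (dollar_count, backslash_run)
def bStep (cs : List Char) (s : Int × Int) (i : Int) : Int × Int :=
  match PySem.List.pyGet? cs i with
  | none => s  -- Python raises IndexError here; excluded by Pre_
  | some ch =>
    if ch = '\\' then (s.1, s.2 + 1)
    else if ch = '$' then
      (if PySem.Int.mod s.2 2 = 0 then s.1 + 1 else s.1, 0)
    else (s.1, 0)

def is_inside_latex_alt (text : String) (position : Int) : Bool :=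
  let r := (PySem.List.pyRange 0 position 1).foldl (bStep text.toList) (0, 0)
  PySem.Int.mod r.1 2 = 1

-- ===== PRECONDITION & SPEC =====
-- Pre_ excludes exactly the inputs where A (and B) raise IndexError: position > len(text).
def Pre_is_inside_latex (text : String) (position : Int) : Prop :=
  position ≤ PySem.Str.len text
instance (text : String) (position : Int) : Decidable (Pre_is_inside_latex text position) := by
  unfold Pre_is_inside_latex; infer_instance

def pvWitness_is_inside_latex : String × Int := ("a $x$ b", 4)

def Spec_is_inside_latex (text : String) (position : Int) (out : Bool) : Prop :=
  out = is_inside_latex_alt text position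
instance (text : String) (position : Int) (out : Bool) : Decidable (Spec_is_inside_latex text position out) := by
  unfold Spec_is_inside_latex; infer_instance

-- ===== CLAIM (what is proved, stated in full; the proofs are below) =====
def Claim_equal_is_inside_latex : Prop :=
  ∀ (text : String) (position : Int), Dom_is_inside_latex text position →
    Pre_is_inside_latex text position →
    Spec_is_inside_latex text position (is_inside_latex text position)

-- ===== LEMMAS AND PROOFS =====

theorem aCount_pos (cs : List Char) (j acc : Int)
    (h : 0 ≤ j ∧ PySem.List.pyGet? cs j = some '\\') :
    aCount cs j acc = aCount cs (j - 1) (acc + 1) := by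
  conv_lhs => rw [aCount]
  rw [dif_pos h]

theorem aCount_neg (cs : List Char) (j acc : Int)
    (h : ¬ (0 ≤ j ∧ PySem.List.pyGet? cs j = some '\\')) :
    aCount cs j acc = acc := by
  conv_lhs => rw [aCount]
  rw [dif_neg h]

theorem aCount_acc_aux (cs : List Char) :
    ∀ (n : Nat) (j acc : Int), (j + 1).toNat ≤ n →
      aCount cs j acc = aCount cs j 0 + acc := by
  intro n
  induction n with
  | zero =>
    intro j acc hn
    have h : ¬ (0 ≤ j ∧ PySem.List.pyGet? cs j = some '\\') := by
      rintro ⟨h1, _⟩; omega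
    rw [aCount_neg cs j acc h, aCount_neg cs j 0 h]; omega
  | succ n ih =>
    intro j acc hn
    by_cases h : 0 ≤ j ∧ PySem.List.pyGet? cs j = some '\\'
    · rw [aCount_pos cs j acc h, aCount_pos cs j 0 h,
        ih (j - 1) (acc + 1) (by omega), ih (j - 1) (0 + 1) (by omega)]
      omega
    · rw [aCount_neg cs j acc h, aCount_neg cs j 0 h]; omega

theorem aCount_acc (cs : List Char) (j acc : Int) :
    aCount cs j acc = aCount cs j 0 + acc :=
  aCount_acc_aux cs (j + 1).toNat j acc (le_refl _)

theorem aCount_step (cs : List Char) (j : Int) (c : Char)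
    (hj : 0 ≤ j) (hc : PySem.List.pyGet? cs j = some c) :
    aCount cs j 0 = if c = '\\' then aCount cs (j - 1) 0 + 1 else 0 := by
  by_cases hb : c = '\\'
  · subst hb
    rw [aCount_pos cs j 0 ⟨hj, hc⟩, aCount_acc, if_pos rfl]; omega
  · have h : ¬ (0 ≤ j ∧ PySem.List.pyGet? cs j = some '\\') := by
      rintro ⟨_, h2⟩; rw [hc] at h2; exact hb (Option.some.inj h2)
    rw [aCount_neg cs j 0 h, if_neg hb]

theorem main_loop (cs : List Char) (p : Int) (hp : p ≤ (cs.length : Int)) :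
    ∀ (n : Nat) (i d : Int), (p - i).toNat ≤ n → 0 ≤ i →
      aLoop cs p i d =
        ((PySem.List.pyRange i p 1).foldl (bStep cs) (d, aCount cs (i - 1) 0)).1 := by
  intro n
  induction n with
  | zero =>
    intro i d hn hi
    have hip : ¬ i < p := by omega
    rw [aLoop, PySem.List.pyRange_one_eq_nil (by omega)]
    simp [hip]
  | succ n ih =>
    intro i d hn hi
    by_cases hip : i < p
    · have hilen : i < (cs.length : Int) := by omega
      obtain ⟨c, hc⟩ : ∃ c, PySem.List.pyGet? cs i = some c :=
        ⟨_, PySem.List.pyGet?_eq_some_getElem cs hi (by omega)⟩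
      rw [aLoop, PySem.List.pyRange_one_cons hip]
      simp only [hip, dif_pos, hc, List.foldl_cons]
      have hstep := aCount_step cs i c hi hc
      by_cases hbs : c = '\\'
      · -- backslash: c ≠ '$'
        have hcd : ¬ c = '$' := by subst hbs; decide
        rw [if_neg hcd]
        rw [ih (i + 1) d (by omega) (by omega)]
        have : aCount cs (i + 1 - 1) 0 = aCount cs (i - 1) 0 + 1 := by
          rw [show i + 1 - 1 = i by ring, hstep, if_pos hbs]
        rw [this]
        simp [bStep, hc, hbs]
      · by_cases hcd : c = '$'
        · rw [if_pos hcd]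
          have hz : aCount cs (i + 1 - 1) 0 = 0 := by
            rw [show i + 1 - 1 = i by ring, hstep, if_neg hbs]
          have hrun0 : aCount cs i 0 = 0 := by rw [hstep, if_neg hbs]
          by_cases hesc : i > 0 ∧ PySem.List.pyGet? cs (i - 1) = some '\\'
          · rw [if_pos hesc]
            by_cases hodd : PySem.Int.mod (aCount cs (i - 1) 0) 2 = 1
            · rw [if_pos hodd, ih (i + 1) d (by omega) (by omega), hz]
              have hdvd : ¬ (2 ∣ aCount cs (i - 1) 0) := by
                rw [← PySem.Int.mod_eq_zero_iff_dvd]; omega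
              simp [bStep, hc, hcd, hdvd]
            · rw [if_neg hodd, ih (i + 1) (d + 1) (by omega) (by omega), hz]
              have hdvd : 2 ∣ aCount cs (i - 1) 0 := by
                rw [← PySem.Int.mod_eq_zero_iff_dvd]
                rcases PySem.Int.mod_two_eq (aCount cs (i - 1) 0) with h | h
                · exact h
                · exact absurd h hodd
              simp [bStep, hc, hcd, hdvd]
          · rw [if_neg hesc, ih (i + 1) (d + 1) (by omega) (by omega), hz]
            have hr0 : aCount cs (i - 1) 0 = 0 := by
              refine aCount_neg cs (i - 1) 0 ?_
              rintro ⟨h1, h2⟩; exact hesc ⟨by omega, h2⟩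
            simp [bStep, hc, hcd, hr0]
        · rw [if_neg hcd, ih (i + 1) d (by omega) (by omega)]
          have hz : aCount cs (i + 1 - 1) 0 = 0 := by
            rw [show i + 1 - 1 = i by ring, hstep, if_neg hbs]
          rw [hz]
          simp [bStep, hc, hcd, hbs]
    · rw [aLoop, PySem.List.pyRange_one_eq_nil (by omega)]
      simp [hip]

-- ===== VERDICT (by name: the statement is the Claim_ definition above) =====
theorem is_inside_latex_spec : Claim_equal_is_inside_latex := by
  intro text position _hdom hpre
  unfold Spec_is_inside_latex is_inside_latex is_inside_latex_alt
  have h0 : aCount text.toList (0 - 1) 0 = 0 := aCount_neg _ _ _ (by rintro ⟨h1, _⟩; omega)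
  rw [main_loop text.toList position (by simpa [PySem.Str.len_eq] using hpre)
      (position - 0).toNat 0 0 (le_refl _) (by omega), h0]
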